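-- pv_equiv track=rewrite | github.com/Omykronn/INFO-MPSI-2021-2022 | tp_12/ex1.py | moycroiss
-- ===== SOURCE A (Python) =====
-- def moycroiss(u: list):
--     n_max = len(u) - 3
--     state = True
--     i = 0
--
--     while i < n_max and state:
--         state = u[i] + u[i + 1] + u[i + 2] <= u[i + 1] + u[i + 2] + u[i + 3]
--         i += 1
--
--     return state
-- ===== SOURCE B (Python) =====
-- def moycroiss(u: list):
--     s = [u[i] + u[i + 1] + u[i + 2] for i in range(len(u) - 2)]
--     return all(s[j] <= s[j + 1] for j in range(len(s) - 1))
-- ===== Notes on version B (the rewrite author's own statement) =====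
-- stated objective: simpler
-- what changed: B materialises the list of 3-element window sums in one pass and then checks that list is non-decreasing with all(), replacing A's single stateful while-loop with early exit and per-step recomputation of both overlapping sums.
import Mathlib
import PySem

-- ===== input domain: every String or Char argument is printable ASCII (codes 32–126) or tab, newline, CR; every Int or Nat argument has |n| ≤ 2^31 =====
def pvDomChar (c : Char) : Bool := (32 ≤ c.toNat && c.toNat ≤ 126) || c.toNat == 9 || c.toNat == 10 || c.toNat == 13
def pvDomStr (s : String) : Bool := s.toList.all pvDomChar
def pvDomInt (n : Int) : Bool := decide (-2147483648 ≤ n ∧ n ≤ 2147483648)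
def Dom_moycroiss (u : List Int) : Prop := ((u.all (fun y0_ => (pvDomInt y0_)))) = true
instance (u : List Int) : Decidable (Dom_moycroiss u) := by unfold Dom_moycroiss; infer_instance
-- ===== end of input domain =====

-- B replaces A's stateful early-exit while-loop by two passes: build the window sums, then check they are non-decreasing (objective: simpler).
-- All indices used by either Python are in range, so pyGetD with default 0 is exact.

-- ===== PORT A =====
-- the while loop: fuel bounds the remaining iterations (the Python loop runs at most n_max steps)
def moycroissLoop (u : List Int) (nmax : Int) : Nat → Int → Bool → Bool
  | 0, _, state => state
  | fuel + 1, i, state =>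
    if i < nmax ∧ state then
      moycroissLoop u nmax fuel (i + 1)
        (decide (PySem.List.pyGetD u i 0 + PySem.List.pyGetD u (i + 1) 0 + PySem.List.pyGetD u (i + 2) 0 ≤
                 PySem.List.pyGetD u (i + 1) 0 + PySem.List.pyGetD u (i + 2) 0 + PySem.List.pyGetD u (i + 3) 0))
    else state

def moycroiss (u : List Int) : Bool :=
  let nmax : Int := (u.length : Int) - 3
  moycroissLoop u nmax nmax.toNat 0 true

-- ===== PORT B =====
def moycroiss_alt (u : List Int) : Bool :=
  let s : List Int := (PySem.List.pyRange 0 ((u.length : Int) - 2) 1).map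
    (fun i => PySem.List.pyGetD u i 0 + PySem.List.pyGetD u (i + 1) 0 + PySem.List.pyGetD u (i + 2) 0)
  (PySem.List.pyRange 0 ((s.length : Int) - 1) 1).all
    (fun j => decide (PySem.List.pyGetD s j 0 ≤ PySem.List.pyGetD s (j + 1) 0))

-- ===== PRECONDITION & SPEC =====
def Spec_moycroiss (u : List Int) (out : Bool) : Prop := out = moycroiss_alt u
instance (u : List Int) (out : Bool) : Decidable (Spec_moycroiss u out) := by unfold Spec_moycroiss; infer_instance

-- ===== CLAIM (what is proved, stated in full; the proofs are below) =====
def Claim_equal_moycroiss : Prop := ∀ (u : List Int), Dom_moycroiss u → Spec_moycroiss u (moycroiss u)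

-- ===== LEMMAS AND PROOFS =====

-- the window sum at natural index j, and the comparison bit at j
def pvW (u : List Int) (j : Nat) : Int :=
  PySem.List.pyGetD u (j : Int) 0 + PySem.List.pyGetD u ((j : Int) + 1) 0 + PySem.List.pyGetD u ((j : Int) + 2) 0

def pvC (u : List Int) (j : Nat) : Bool := decide (pvW u j ≤ pvW u (j + 1))

-- A's loop, started at natural index i, checks pvC on [i, i + min fuel (m - i))
lemma moycroissLoop_eq (u : List Int) (m : Nat) (fuel i : Nat) (state : Bool) :
    moycroissLoop u ((m : Int)) fuel (i : Int) state
      = (state && (List.range' i (min fuel (m - i))).all (pvC u)) := by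
  induction fuel generalizing i state with
  | zero => simp [moycroissLoop]
  | succ f ih =>
    by_cases hs : state
    · subst hs
      by_cases hi : i < m
      · have hlt : (i : Int) < (m : Int) := by exact_mod_cast hi
        have hmin : min (f + 1) (m - i) = min f (m - (i + 1)) + 1 := by omega
        have hcast : ((i : Int) + 1) = (((i + 1 : Nat)) : Int) := by push_cast; ring
        rw [moycroissLoop, if_pos ⟨hlt, rfl⟩, hcast, ih (i + 1), hmin, List.range'_succ,
          List.all_cons]
        simp only [pvC, pvW, ← hcast]
        have e2 : ((i : Int) + 1 + 1) = (i : Int) + 2 := by ring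
        have e3 : ((i : Int) + 1 + 2) = (i : Int) + 3 := by ring
        simp only [e2, e3]
        simp
      · have hnlt : ¬ ((i : Int) < (m : Int)) := by exact_mod_cast hi
        rw [moycroissLoop, if_neg (by tauto)]
        have : min (f + 1) (m - i) = 0 := by omega
        simp [this]
    · simp at hs; subst hs
      rw [moycroissLoop, if_neg (by tauto)]
      simp

lemma moycroiss_eq_all (u : List Int) (m : Nat) (hm : m = u.length - 3) :
    moycroiss u = (List.range' 0 m).all (pvC u) := by
  have hdef : moycroiss u
      = moycroissLoop u ((u.length : Int) - 3) ((u.length : Int) - 3).toNat 0 true := rfl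
  rw [hdef]
  by_cases h3 : 3 ≤ u.length
  · have hcast : ((u.length : Int) - 3) = (m : Int) := by omega
    rw [hcast, Int.toNat_natCast]
    have h0 : ((0 : Nat) : Int) = (0 : Int) := rfl
    rw [← h0, moycroissLoop_eq u m m 0 true]
    simp
  · have hm0 : m = 0 := by omega
    have htn : ((u.length : Int) - 3).toNat = 0 := by omega
    rw [htn, hm0]
    simp [moycroissLoop]

lemma moycroiss_alt_eq_all (u : List Int) (m : Nat) (hm : m = u.length - 3) :
    moycroiss_alt u = (List.range' 0 m).all (pvC u) := by
  have hdef : moycroiss_alt u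
      = (PySem.List.pyRange 0 ((((PySem.List.pyRange 0 ((u.length : Int) - 2) 1).map
            (fun i => PySem.List.pyGetD u i 0 + PySem.List.pyGetD u (i + 1) 0 + PySem.List.pyGetD u (i + 2) 0)).length : Int) - 1) 1).all
          (fun j => decide (PySem.List.pyGetD ((PySem.List.pyRange 0 ((u.length : Int) - 2) 1).map
            (fun i => PySem.List.pyGetD u i 0 + PySem.List.pyGetD u (i + 1) 0 + PySem.List.pyGetD u (i + 2) 0)) j 0
            ≤ PySem.List.pyGetD ((PySem.List.pyRange 0 ((u.length : Int) - 2) 1).map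
            (fun i => PySem.List.pyGetD u i 0 + PySem.List.pyGetD u (i + 1) 0 + PySem.List.pyGetD u (i + 2) 0)) (j + 1) 0)) := rfl
  rw [hdef]
  have hslen : ((PySem.List.pyRange 0 ((u.length : Int) - 2) 1).map
      (fun i => PySem.List.pyGetD u i 0 + PySem.List.pyGetD u (i + 1) 0 + PySem.List.pyGetD u (i + 2) 0)).length
      = ((u.length : Int) - 2).toNat := by
    simp [PySem.List.length_pyRange_one]
  rw [Bool.eq_iff_iff, List.all_eq_true, List.all_eq_true]
  simp only [hslen]
  constructor <;> intro h
  · intro j hj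
    have hjm : j < m := by
      rcases List.mem_range'_1.mp hj with ⟨_, h2⟩
      omega
    have hmem : (j : Int) ∈ PySem.List.pyRange 0 ((((u.length : Int) - 2).toNat : Int) - 1) 1 := by
      rw [PySem.List.mem_pyRange_one]
      constructor <;> omega
    have hx := h (j : Int) hmem
    have e1 := PySem.List.pyGetD_map_pyRange_of_nonneg
      (fun i => PySem.List.pyGetD u i 0 + PySem.List.pyGetD u (i + 1) 0 + PySem.List.pyGetD u (i + 2) 0)
      ((u.length : Int) - 2) (j : Int) 0 (by omega) (by omega)
    have e2 := PySem.List.pyGetD_map_pyRange_of_nonneg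
      (fun i => PySem.List.pyGetD u i 0 + PySem.List.pyGetD u (i + 1) 0 + PySem.List.pyGetD u (i + 2) 0)
      ((u.length : Int) - 2) ((j : Int) + 1) 0 (by omega) (by omega)
    simp only [e1, e2] at hx
    simp only [pvC, pvW, decide_eq_true_eq] at hx ⊢
    have harith : ((j + 1 : Nat) : Int) = (j : Int) + 1 := by push_cast; ring
    rw [harith]
    convert hx using 2
  · intro x hx
    rcases PySem.List.mem_pyRange_one.mp hx with ⟨hx0, hx1⟩
    obtain ⟨j, rfl⟩ := Int.eq_ofNat_of_zero_le hx0
    have hjm : j < m := by omega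
    have hmem : j ∈ List.range' 0 m := List.mem_range'_1.mpr (by omega)
    have hc := h j hmem
    have e1 := PySem.List.pyGetD_map_pyRange_of_nonneg
      (fun i => PySem.List.pyGetD u i 0 + PySem.List.pyGetD u (i + 1) 0 + PySem.List.pyGetD u (i + 2) 0)
      ((u.length : Int) - 2) (j : Int) 0 (by omega) (by omega)
    have e2 := PySem.List.pyGetD_map_pyRange_of_nonneg
      (fun i => PySem.List.pyGetD u i 0 + PySem.List.pyGetD u (i + 1) 0 + PySem.List.pyGetD u (i + 2) 0)
      ((u.length : Int) - 2) ((j : Int) + 1) 0 (by omega) (by omega)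
    simp only [e1, e2]
    simp only [pvC, pvW, decide_eq_true_eq] at hc ⊢
    have harith : ((j + 1 : Nat) : Int) = (j : Int) + 1 := by push_cast; ring
    rw [harith] at hc
    convert hc using 2

-- ===== VERDICT (by name: the statement is the Claim_ definition above) =====
theorem moycroiss_spec : Claim_equal_moycroiss := by
  intro u _
  unfold Spec_moycroiss
  rw [moycroiss_eq_all u (u.length - 3) rfl, moycroiss_alt_eq_all u (u.length - 3) rfl]
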